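-- pv_equiv track=rewrite | github.com/ipaljak-tbtl/advent-of-code | 2024/krupic/07/sol2.py | rec
-- ===== SOURCE A (Python) =====
-- def rec(val_acc, exp_acc, exp_tail, res):
--     if not exp_tail:
--         if val_acc == res:
--             return exp_acc
--         else:
--             return None
--
--     exp_head, exp_tail = exp_tail[0], exp_tail[1:]
--     if ops := rec(
--         val_acc + exp_head,
--         exp_acc + ['+'],
--         exp_tail,
--         res
--     ):
--         return ops
--
--     if ops := rec(
--         val_acc * exp_head,
--         exp_acc + ['*'],
--         exp_tail,
--         res
--     ):
--         return ops
--
--     if ops := rec(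
--         val_acc * 10 ** len(str(exp_head)) + exp_head,
--         exp_acc + ['||'],
--         exp_tail,
--         res
--     ):
--         return ops
-- ===== SOURCE B (Python) =====
-- def rec(val_acc, exp_acc, exp_tail, res):
--     # Breadth-first over values only: level k holds the 3**k reachable values in
--     # lexicographic +,*,|| order, so the first index hitting res encodes (base 3)
--     # the operator sequence A's depth-first search would find first.
--     vals = [val_acc]
--     for x in exp_tail:
--         c = 10 ** len(str(x))
--         vals = [w for v in vals for w in (v + x, v * x, v * c + x)]
--     for i, v in enumerate(vals):
--         if v == res:
--             ops = []
--             code = i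
--             for _ in exp_tail:
--                 ops.append(('+', '*', '||')[code % 3])
--                 code //= 3
--             ops.reverse()
--             return exp_acc + ops
--     return None
-- ===== Notes on version B (the rewrite author's own statement) =====
-- stated objective: alternative
-- what changed: Replaced the early-returning depth-first recursion by an iterative breadth-first fold over values only, then a single scan whose first matching index is decoded in base 3 into the operator list.
import Mathlib
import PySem

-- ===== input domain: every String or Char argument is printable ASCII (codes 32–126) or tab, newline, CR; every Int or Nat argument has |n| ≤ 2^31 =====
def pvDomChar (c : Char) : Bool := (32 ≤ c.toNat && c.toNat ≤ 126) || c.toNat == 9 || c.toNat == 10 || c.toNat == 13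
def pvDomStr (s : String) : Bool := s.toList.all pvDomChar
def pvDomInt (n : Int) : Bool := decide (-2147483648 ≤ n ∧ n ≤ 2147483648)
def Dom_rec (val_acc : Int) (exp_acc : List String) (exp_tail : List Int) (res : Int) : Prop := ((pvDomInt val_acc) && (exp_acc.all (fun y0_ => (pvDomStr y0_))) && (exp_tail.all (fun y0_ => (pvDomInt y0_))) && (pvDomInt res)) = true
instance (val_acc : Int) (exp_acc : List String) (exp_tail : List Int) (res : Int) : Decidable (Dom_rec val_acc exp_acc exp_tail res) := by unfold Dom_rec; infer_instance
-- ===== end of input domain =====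

-- B replaces A's early-returning depth-first recursion by an iterative breadth-first
-- fold over values plus base-3 decoding of the first matching index (alternative decomposition).

-- ===== PORT A =====
-- Python truthiness of `if ops := rec(...)`: true iff the result is a non-None, nonempty list
def pvTruthy (o : Option (List String)) : Bool :=
  match o with
  | some l => !l.isEmpty
  | none => false

def rec (val_acc : Int) (exp_acc : List String) (exp_tail : List Int) (res : Int) : Option (List String) :=
  match exp_tail with
  | [] => if val_acc = res then some exp_acc else none
  | exp_head :: exp_tail =>
    let r1 := rec (val_acc + exp_head) (exp_acc ++ ["+"]) exp_tail res
    if pvTruthy r1 then r1 else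
    let r2 := rec (val_acc * exp_head) (exp_acc ++ ["*"]) exp_tail res
    if pvTruthy r2 then r2 else
    let r3 := rec (val_acc * 10 ^ (PySem.Int.toChars exp_head).length + exp_head)
                  (exp_acc ++ ["||"]) exp_tail res
    if pvTruthy r3 then r3 else none

-- ===== PORT B =====
-- one BFS level: each value expands into its three successors, in +,*,|| order
def recAltStep (vs : List Int) (x : Int) : List Int :=
  vs.flatMap (fun v => [v + x, v * x, v * 10 ^ (PySem.Int.toChars x).length + x])

-- Source B's decode loop: append ('+','*','||')[code % 3], code //= 3, then reverse
-- (code % 3 < 3 always, so the getD default is never used)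
def recAltDecode (code : Nat) (exp_tail : List Int) : List String :=
  (exp_tail.foldl (fun (st : Nat × List String) _ =>
    (st.1 / 3, st.2 ++ [["+", "*", "||"].getD (st.1 % 3) "+"])) (code, [])).2.reverse

def rec_alt (val_acc : Int) (exp_acc : List String) (exp_tail : List Int) (res : Int) : Option (List String) :=
  let vals := exp_tail.foldl recAltStep [val_acc]
  match vals.findIdx? (fun v => v == res) with
  | some i => some (exp_acc ++ recAltDecode i exp_tail)
  | none => none

-- ===== PRECONDITION & SPEC =====
def Spec_rec (val_acc : Int) (exp_acc : List String) (exp_tail : List Int) (res : Int) (out : Option (List String)) : Prop := out = rec_alt val_acc exp_acc exp_tail res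
instance (val_acc : Int) (exp_acc : List String) (exp_tail : List Int) (res : Int) (out : Option (List String)) : Decidable (Spec_rec val_acc exp_acc exp_tail res out) := by unfold Spec_rec; infer_instance

-- ===== CLAIM (what is proved, stated in full; the proofs are below) =====
def Claim_equal_rec : Prop := ∀ (val_acc : Int) (exp_acc : List String) (exp_tail : List Int) (res : Int), Dom_rec val_acc exp_acc exp_tail res → Spec_rec val_acc exp_acc exp_tail res (rec val_acc exp_acc exp_tail res)

-- ===== LEMMAS AND PROOFS =====

-- the DFS leaf list of (final value, operator list), in A's +,*,|| visiting order
def pvLeaves (v : Int) : List Int → List (Int × List String)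
  | [] => [(v, [])]
  | x :: t =>
      ((pvLeaves (v + x) t).map (fun p => (p.1, "+" :: p.2))) ++
      ((pvLeaves (v * x) t).map (fun p => (p.1, "*" :: p.2))) ++
      ((pvLeaves (v * 10 ^ (PySem.Int.toChars x).length + x) t).map (fun p => (p.1, "||" :: p.2)))

theorem length_pvLeaves (t : List Int) : ∀ v : Int, (pvLeaves v t).length = 3 ^ t.length := by
  induction t with
  | nil => intro v; simp [pvLeaves]
  | cons x t ih =>
    intro v
    simp only [pvLeaves, List.length_append, List.length_map, ih, List.length_cons]
    ring

-- A computes: first leaf hitting res, with exp_acc prepended to its ops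
theorem rec_char (t : List Int) (res : Int) : ∀ (v : Int) (ea : List String),
    rec v ea t res = ((pvLeaves v t).find? (fun p => p.1 == res)).map (fun p => ea ++ p.2) := by
  induction t with
  | nil =>
    intro v ea
    simp only [rec, pvLeaves, List.find?]
    by_cases h : v = res
    · simp [h]
    · have hb : (v == res) = false := beq_eq_false_iff_ne.mpr h
      simp [hb, h]
  | cons x t ih =>
    intro v ea
    simp only [rec, pvLeaves, List.find?_append]
    rw [ih, ih, ih]
    rcases h1 : (pvLeaves (v + x) t).find? (fun p => p.1 == res) with _ | p1
    · rcases h2 : (pvLeaves (v * x) t).find? (fun p => p.1 == res) with _ | p2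
      · rcases h3 : (pvLeaves (v * 10 ^ (PySem.Int.toChars x).length + x) t).find? (fun p => p.1 == res) with _ | p3
        · simp [pvTruthy, List.find?_map, h1, h2, h3, Function.comp_def]
        · simp [pvTruthy, List.find?_map, h1, h2, h3, Function.comp_def]
      · simp [pvTruthy, List.find?_map, h1, h2, Function.comp_def]
    · simp [pvTruthy, List.find?_map, h1, Function.comp_def]

-- B's value fold expands every value into its leaf values, preserving order
theorem foldl_step_char (t : List Int) : ∀ (V : List Int),
    t.foldl recAltStep V = V.flatMap (fun v => (pvLeaves v t).map Prod.fst) := by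
  induction t with
  | nil => intro V; simp [pvLeaves]
  | cons x t ih =>
    intro V
    rw [List.foldl_cons, ih]
    simp only [recAltStep, List.flatMap_assoc]
    apply List.flatMap_congr
    intro v _
    simp [pvLeaves, List.map_append, List.map_map, Function.comp_def]

-- base-3 digits of a code, least significant first, as operator strings
def pvLsb : Nat → Nat → List String
  | 0, _ => []
  | n + 1, c => ["+", "*", "||"].getD (c % 3) "+" :: pvLsb n (c / 3)

theorem recAltDecode_char (t : List Int) : ∀ (c : Nat) (acc : List String),
    (t.foldl (fun (st : Nat × List String) _ =>
      (st.1 / 3, st.2 ++ [["+", "*", "||"].getD (st.1 % 3) "+"])) (c, acc)).2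
      = acc ++ pvLsb t.length c := by
  induction t with
  | nil => intro c acc; simp [pvLsb]
  | cons x t ih =>
    intro c acc
    rw [List.foldl_cons, ih]
    simp [pvLsb, List.append_assoc]

theorem pvLsb_block (m : Nat) : ∀ (b j : Nat), j < 3 ^ m → b < 3 →
    pvLsb (m + 1) (b * 3 ^ m + j) = pvLsb m j ++ [["+", "*", "||"].getD b "+"] := by
  induction m with
  | zero =>
    intro b j hj hb
    interval_cases j
    simp [pvLsb, Nat.mod_eq_of_lt hb]
  | succ m ih =>
    intro b j hj hb
    have hq : b * 3 ^ (m + 1) + j = 3 * (b * 3 ^ m) + j := by ring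
    have hq3 : (3 : Nat) ^ (m + 1) = 3 * 3 ^ m := by ring
    have hmod : (b * 3 ^ (m + 1) + j) % 3 = j % 3 := by rw [hq]; omega
    have hdiv : (b * 3 ^ (m + 1) + j) / 3 = b * 3 ^ m + j / 3 := by rw [hq]; omega
    have hj3 : j / 3 < 3 ^ m := by rw [hq3] at hj; omega
    show ["+", "*", "||"].getD ((b * 3 ^ (m + 1) + j) % 3) "+" :: pvLsb (m + 1) ((b * 3 ^ (m + 1) + j) / 3) = _
    rw [hmod, hdiv, ih b (j / 3) hj3 hb]
    show _ = (["+", "*", "||"].getD (j % 3) "+" :: pvLsb m (j / 3)) ++ _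
    simp

-- the i-th DFS leaf's operator list is the reversed base-3 decoding of i
theorem pvLsb_getElem (t : List Int) : ∀ (v : Int) (i : Nat) (p : Int × List String),
    (pvLeaves v t)[i]? = some p → (pvLsb t.length i).reverse = p.2 := by
  induction t with
  | nil =>
    intro v i p h
    rcases i with _ | i
    · simp [pvLeaves] at h
      simp [pvLsb, ← h]
    · simp [pvLeaves] at h
  | cons x t ih =>
    intro v i p h
    have hm := length_pvLeaves t
    simp only [pvLeaves] at h
    by_cases h1 : i < 3 ^ t.length
    · rw [List.getElem?_append_left (by simp [hm]; omega)] at h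
      rw [List.getElem?_append_left (by simp [hm]; omega)] at h
      rw [List.getElem?_map] at h
      rcases hq : (pvLeaves (v + x) t)[i]? with _ | q
      · rw [hq] at h; simp at h
      · rw [hq] at h; simp at h
        have h0 : (0 : Nat) * 3 ^ t.length + i = i := by omega
        rw [List.length_cons, ← h0, pvLsb_block t.length 0 i h1 (by omega)]
        simp [← h, ih (v + x) i q hq]
    · by_cases h2 : i < 2 * 3 ^ t.length
      · rw [List.getElem?_append_left (by simp [hm]; omega)] at h
        rw [List.getElem?_append_right (by simp [hm]; omega)] at h
        simp only [List.length_map, hm] at h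
        rw [List.getElem?_map] at h
        rcases hq : (pvLeaves (v * x) t)[i - 3 ^ t.length]? with _ | q
        · rw [hq] at h; simp at h
        · rw [hq] at h; simp at h
          have h0 : (1 : Nat) * 3 ^ t.length + (i - 3 ^ t.length) = i := by omega
          rw [List.length_cons, ← h0,
            pvLsb_block t.length 1 (i - 3 ^ t.length) (by omega) (by omega)]
          simp [← h, ih (v * x) (i - 3 ^ t.length) q hq]
      · rw [List.getElem?_append_right (by simp [hm]; omega)] at h
        simp only [List.length_append, List.length_map, hm] at h
        rw [List.getElem?_map] at h
        rcases hq : (pvLeaves (v * 10 ^ (PySem.Int.toChars x).length + x) t)[i - (3 ^ t.length + 3 ^ t.length)]? with _ | q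
        · rw [hq] at h; simp at h
        · rw [hq] at h; simp at h
          have hlt : i - (3 ^ t.length + 3 ^ t.length) < 3 ^ t.length := by
            have hl := (List.getElem?_eq_some_iff.mp hq).1
            rw [hm] at hl
            omega
          have h0 : (2 : Nat) * 3 ^ t.length + (i - (3 ^ t.length + 3 ^ t.length)) = i := by omega
          rw [List.length_cons, ← h0,
            pvLsb_block t.length 2 (i - (3 ^ t.length + 3 ^ t.length)) hlt (by omega)]
          simp [← h, ih _ (i - (3 ^ t.length + 3 ^ t.length)) q hq]

-- B computes the same first-match characterization as A
theorem rec_alt_char (v : Int) (ea : List String) (t : List Int) (res : Int) :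
    rec_alt v ea t res = ((pvLeaves v t).find? (fun p => p.1 == res)).map (fun p => ea ++ p.2) := by
  have hvals : t.foldl recAltStep [v] = (pvLeaves v t).map Prod.fst := by
    rw [foldl_step_char]; simp
  have hfind : ((pvLeaves v t).map Prod.fst).findIdx? (fun w => w == res)
      = (pvLeaves v t).findIdx? (fun p => p.1 == res) := by
    rw [List.findIdx?_map]; rfl
  rw [List.find?_eq_bind_findIdx?_getElem?]
  simp only [rec_alt, hvals, hfind]
  rcases hi : (pvLeaves v t).findIdx? (fun p => p.1 == res) with _ | i
  · simp [hi]
  · have hlt : i < (pvLeaves v t).length :=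
      (List.findIdx?_eq_some_iff_findIdx_eq.mp hi).1
    rcases hp : (pvLeaves v t)[i]? with _ | p
    · rw [List.getElem?_eq_none_iff] at hp; omega
    · have hdec : recAltDecode i t = p.2 := by
        rw [recAltDecode, recAltDecode_char]
        simpa using pvLsb_getElem t v i p hp
      simp [hi, hp, hdec]

-- ===== VERDICT (by name: the statement is the Claim_ definition above) =====
theorem rec_spec : Claim_equal_rec := by
  intro val_acc exp_acc exp_tail res _
  unfold Spec_rec
  rw [rec_char, rec_alt_char]
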